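-- pv_equiv track=rewrite | github.com/zzzeek/openmoxie | site/hive/mqtt/scheduler.py | distribute_elements
-- ===== SOURCE A (Python) =====
-- def distribute_elements(list2, list1):
--     # swap lists so list2 is always larger
--     if len(list1) > len(list2):
--         list1,list2 = list2,list1
--     result = list2[:]
--     gap = len(list2) // (len(list1) + 1)
--     offset = 0
--     for elem in list1:
--         result.insert(offset + gap, elem)
--         offset += gap + 1
--     return result
-- ===== SOURCE B (Python) =====
-- def distribute_elements(list2, list1):
--     # swap lists so list2 is always larger
--     if len(list1) > len(list2):
--         list1, list2 = list2, list1
--     n, k = len(list2), len(list1)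
--     gap = n // (k + 1)
--     # element j of the result is list1[q] exactly when j is the q-th insertion
--     # position gap + q*(gap+1); otherwise it is the next unused list2 element,
--     # of which exactly min(q, k) list1 elements precede position j.
--     return [list1[j // (gap + 1)]
--             if j % (gap + 1) == gap and j // (gap + 1) < k
--             else list2[j - min(j // (gap + 1), k)]
--             for j in range(n + k)]
-- ===== Notes on version B (the rewrite author's own statement) =====
-- stated objective: faster
-- what changed: Instead of repeatedly calling list.insert on a growing copy of the larger list (each insert shifts the whole tail), B computes, for each output index j, arithmetically whether it holds a list1 element (j is an insertion position gap + q*(gap+1)) or the next list2 element, building the result in one comprehension.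
import Mathlib
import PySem

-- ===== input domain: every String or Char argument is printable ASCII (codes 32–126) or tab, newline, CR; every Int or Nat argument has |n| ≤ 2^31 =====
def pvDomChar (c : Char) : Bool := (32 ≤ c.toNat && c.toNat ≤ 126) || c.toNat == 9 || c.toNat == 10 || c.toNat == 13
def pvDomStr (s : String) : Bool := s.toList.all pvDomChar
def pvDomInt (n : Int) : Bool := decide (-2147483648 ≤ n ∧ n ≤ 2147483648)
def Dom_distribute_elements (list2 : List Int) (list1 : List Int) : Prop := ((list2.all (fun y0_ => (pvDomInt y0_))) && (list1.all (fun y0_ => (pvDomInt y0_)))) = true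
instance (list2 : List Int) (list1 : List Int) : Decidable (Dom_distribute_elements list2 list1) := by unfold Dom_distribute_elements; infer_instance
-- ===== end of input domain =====

-- B replaces A's repeated list.insert into a growing copy of the larger list (quadratic
-- shifting) by a single comprehension that decides each output position arithmetically.

-- ===== PORT A =====
def distribute_elements (list2 : List Int) (list1 : List Int) : List Int :=
  -- swap lists so list2 is always larger
  let p := if list1.length > list2.length then (list2, list1) else (list1, list2)
  let l1 := p.1
  let l2 := p.2
  let result := l2   -- result = list2[:]
  let gap : Int := PySem.Int.floordiv (l2.length : Int) ((l1.length : Int) + 1)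
  -- for elem in list1: result.insert(offset + gap, elem); offset += gap + 1
  (l1.foldl (fun (st : List Int × Int) elem =>
      (PySem.List.insert st.1 (st.2 + gap) elem, st.2 + gap + 1)) (result, 0)).1

-- ===== PORT B =====
def distribute_elements_alt (list2 : List Int) (list1 : List Int) : List Int :=
  let p := if list1.length > list2.length then (list2, list1) else (list1, list2)
  let l1 := p.1
  let l2 := p.2
  let n : Int := (l2.length : Int)
  let k : Int := (l1.length : Int)
  let gap : Int := PySem.Int.floordiv n (k + 1)
  -- [list1[j//(gap+1)] if j%(gap+1)==gap and j//(gap+1)<k else list2[j-min(j//(gap+1),k)]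
  --  for j in range(n+k)]
  -- the two indexings are always in range (proved below), so pyGetD's default is never used
  (PySem.List.pyRange 0 (n + k) 1).map (fun j =>
    if PySem.Int.mod j (gap + 1) = gap ∧ PySem.Int.floordiv j (gap + 1) < k then
      PySem.List.pyGetD l1 (PySem.Int.floordiv j (gap + 1)) 0
    else
      PySem.List.pyGetD l2 (j - min (PySem.Int.floordiv j (gap + 1)) k) 0)

-- ===== PRECONDITION & SPEC =====
def Spec_distribute_elements (list2 : List Int) (list1 : List Int) (out : List Int) : Prop := out = distribute_elements_alt list2 list1
instance (list2 : List Int) (list1 : List Int) (out : List Int) : Decidable (Spec_distribute_elements list2 list1 out) := by unfold Spec_distribute_elements; infer_instance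

-- ===== CLAIM (what is proved, stated in full; the proofs are below) =====
def Claim_equal_distribute_elements : Prop := ∀ (list2 : List Int) (list1 : List Int), Dom_distribute_elements list2 list1 → Spec_distribute_elements list2 list1 (distribute_elements list2 list1)

-- ===== LEMMAS AND PROOFS =====

-- reference shape: interleave chunks of size g of `rest` with the elements of `es`
def pvChunks (g : Nat) : List Int → List Int → List Int
  | [], rest => rest
  | e :: es, rest => rest.take g ++ e :: pvChunks g es (rest.drop g)

-- A's fold computes pvChunks, provided each insertion position is in range
lemma afold_eq_chunks (g : Nat) :
    ∀ (es out rest : List Int), es.length * g ≤ rest.length →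
      (es.foldl (fun (st : List Int × Int) elem =>
          (PySem.List.insert st.1 (st.2 + (g : Int)) elem, st.2 + (g : Int) + 1))
          (out ++ rest, (out.length : Int))).1
      = out ++ pvChunks g es rest := by
  intro es
  induction es with
  | nil => intro out rest _; simp [pvChunks]
  | cons e es ih =>
      intro out rest hle
      have hg : g ≤ rest.length := by
        have := hle; simp [List.length_cons, Nat.succ_mul] at this; omega
      have hcast : (out.length : Int) + (g : Int) = ((out.length + g : Nat) : Int) := by
        push_cast; ring
      simp only [List.foldl_cons, hcast]
      rw [PySem.List.insert_natCast _ _ _ (by simp; omega)]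
      have htake : (out ++ rest).take (out.length + g) = out ++ rest.take g := by
        rw [List.take_append]
        simp
      have hdrop : (out ++ rest).drop (out.length + g) = rest.drop g := by
        rw [List.drop_append]
        simp
      rw [htake, hdrop]
      have hlen : ((out.length + g : Nat) : Int) + 1
          = (((out ++ rest.take g ++ [e]).length : Nat) : Int) := by
        simp [List.length_append, List.length_take, Nat.min_eq_left hg]
        ring
      have hrearr : out ++ rest.take g ++ e :: rest.drop g
          = (out ++ rest.take g ++ [e]) ++ rest.drop g := by simp
      rw [hrearr, hlen, ih (out ++ rest.take g ++ [e]) (rest.drop g)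
            (by simp [List.length_drop]; simp [List.length_cons, Nat.succ_mul] at hle; omega)]
      simp [pvChunks]

lemma chunks_length (g : Nat) :
    ∀ (es rest : List Int), es.length * g ≤ rest.length →
      (pvChunks g es rest).length = es.length + rest.length := by
  intro es
  induction es with
  | nil => intro rest _; simp [pvChunks]
  | cons e es ih =>
      intro rest hle
      have hg : g ≤ rest.length := by
        have := hle; simp [List.length_cons, Nat.succ_mul] at this; omega
      have := ih (rest.drop g) (by simp [List.length_drop]; simp [List.length_cons, Nat.succ_mul] at hle; omega)
      simp [pvChunks, this, List.length_take, Nat.min_eq_left hg, List.length_drop]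
      omega

-- Nat-level view of B's per-index choice
def pvPick (g : Nat) (es rest : List Int) (j : Nat) : Int :=
  if j % (g + 1) = g ∧ j / (g + 1) < es.length then es.getD (j / (g + 1)) 0
  else rest.getD (j - min (j / (g + 1)) es.length) 0

lemma chunks_getElem? (g : Nat) :
    ∀ (es rest : List Int), es.length * g ≤ rest.length →
      ∀ j, j < es.length + rest.length →
        (pvChunks g es rest)[j]? = some (pvPick g es rest j) := by
  intro es
  induction es with
  | nil =>
      intro rest _ j hj
      simp only [List.length_nil, Nat.zero_add] at hj
      have hc : ¬ (j % (g + 1) = g ∧ j / (g + 1) < ([] : List Int).length) := by simp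
      unfold pvPick
      rw [if_neg hc]
      simp [pvChunks, List.getD, List.getElem?_eq_getElem hj]
  | cons e es ih =>
      intro rest hle j hj
      have hg : g ≤ rest.length := by
        have := hle; simp [List.length_cons, Nat.succ_mul] at this; omega
      have htklen : (rest.take g).length = g := by simp [Nat.min_eq_left hg]
      rcases lt_trichotomy j g with hlt | heq | hgt
      · -- j < g : comes from the first chunk
        have h1 : (pvChunks g (e :: es) rest)[j]? = rest[j]? := by
          simp only [pvChunks]
          rw [List.getElem?_append_left (by omega : j < (rest.take g).length)]
          simp [hlt]
        have hjr : j < rest.length := by omega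
        have hmod : j % (g + 1) = j := Nat.mod_eq_of_lt (by omega)
        have hdiv : j / (g + 1) = 0 := Nat.div_eq_of_lt (by omega)
        have hc : ¬ (j % (g + 1) = g ∧ j / (g + 1) < (e :: es).length) := by
          rw [hmod]; intro hcc; omega
        unfold pvPick
        rw [if_neg hc, hdiv, h1, List.getElem?_eq_getElem hjr]
        simp [List.getD, List.getElem?_eq_getElem hjr]
      · -- j = g : the inserted element e
        have h1 : (pvChunks g (e :: es) rest)[j]? = some e := by
          simp only [pvChunks]
          rw [List.getElem?_append_right (by omega : (rest.take g).length ≤ j)]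
          simp [htklen, heq]
        have hmod : j % (g + 1) = g := by rw [heq]; exact Nat.mod_eq_of_lt (by omega)
        have hdiv : j / (g + 1) = 0 := by rw [heq]; exact Nat.div_eq_of_lt (by omega)
        have hc : j % (g + 1) = g ∧ j / (g + 1) < (e :: es).length := ⟨hmod, by rw [hdiv]; simp⟩
        unfold pvPick
        rw [if_pos hc, hdiv, h1]
        rfl
      · -- j > g : recurse into the tail with j' = j - g - 1
        obtain ⟨j', rfl⟩ : ∃ j', j = j' + (g + 1) := ⟨j - (g + 1), by omega⟩
        have hrec : (pvChunks g (e :: es) rest)[j' + (g + 1)]? =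
            (pvChunks g es (rest.drop g))[j']? := by
          simp only [pvChunks]
          rw [List.getElem?_append_right (by omega : (rest.take g).length ≤ j' + (g + 1))]
          rw [htklen]
          have : j' + (g + 1) - g = j' + 1 := by omega
          rw [this, List.getElem?_cons_succ]
        have hle' : es.length * g ≤ (rest.drop g).length := by
          simp [List.length_drop]; simp [List.length_cons, Nat.succ_mul] at hle; omega
        have hj' : j' < es.length + (rest.drop g).length := by
          simp [List.length_drop]; simp [List.length_cons] at hj; omega
        rw [hrec, ih (rest.drop g) hle' j' hj']
        -- now identify the two pvPick values
        congr 1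
        have hmod : (j' + (g + 1)) % (g + 1) = j' % (g + 1) := Nat.add_mod_right _ _
        have hdiv : (j' + (g + 1)) / (g + 1) = j' / (g + 1) + 1 := Nat.add_div_right _ (by omega)
        have hqle : j' / (g + 1) ≤ j' := Nat.div_le_self _ _
        by_cases hc : j' % (g + 1) = g ∧ j' / (g + 1) < es.length
        · have h2 : pvPick g es (rest.drop g) j' = es.getD (j' / (g + 1)) 0 := by
            unfold pvPick; rw [if_pos hc]
          have h3 : pvPick g (e :: es) rest (j' + (g + 1))
              = (e :: es).getD (j' / (g + 1) + 1) 0 := by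
            unfold pvPick
            rw [if_pos (by rw [hmod, hdiv]; exact ⟨hc.1, by simp; omega⟩ :
              (j' + (g + 1)) % (g + 1) = g ∧ (j' + (g + 1)) / (g + 1) < (e :: es).length), hdiv]
          rw [h2, h3]
          simp [List.getD]
        · have h2 : pvPick g es (rest.drop g) j'
              = (rest.drop g).getD (j' - min (j' / (g + 1)) es.length) 0 := by
            unfold pvPick; rw [if_neg hc]
          have hc' : ¬ ((j' + (g + 1)) % (g + 1) = g ∧
              (j' + (g + 1)) / (g + 1) < (e :: es).length) := by
            rw [hmod, hdiv]; simp only [List.length_cons]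
            intro ⟨ha, hb⟩; exact hc ⟨ha, by omega⟩
          have h3 : pvPick g (e :: es) rest (j' + (g + 1))
              = rest.getD (j' + (g + 1) - min (j' / (g + 1) + 1) (es.length + 1)) 0 := by
            unfold pvPick; rw [if_neg hc', hdiv]; rfl
          rw [h2, h3]
          have hmin : min (j' / (g + 1) + 1) (es.length + 1) = min (j' / (g + 1)) es.length + 1 := by
            omega
          have hminle : min (j' / (g + 1)) es.length ≤ j' :=
            le_trans (Nat.min_le_left _ _) hqle
          rw [hmin, (by omega : j' + (g + 1) - (min (j' / (g + 1)) es.length + 1)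
              = g + (j' - min (j' / (g + 1)) es.length))]
          simp [List.getD, List.getElem?_drop]

-- B's map over the range equals pvChunks
lemma bmap_eq_chunks (g : Nat) (es rest : List Int) (hle : es.length * g ≤ rest.length) :
    (List.range (rest.length + es.length)).map (pvPick g es rest) = pvChunks g es rest := by
  apply List.ext_getElem?
  intro j
  by_cases hj : j < es.length + rest.length
  · rw [chunks_getElem? g es rest hle j hj]
    rw [List.getElem?_map, List.getElem?_range (by omega)]
    rfl
  · rw [List.getElem?_eq_none (by rw [List.length_map, List.length_range]; omega)]
    rw [List.getElem?_eq_none (by rw [chunks_length g es rest hle]; omega)]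

-- the core equality, for any pair (l1, l2) after the swap
lemma core (l1 l2 : List Int) :
    (l1.foldl (fun (st : List Int × Int) elem =>
        (PySem.List.insert st.1 (st.2 + PySem.Int.floordiv (l2.length : Int) ((l1.length : Int) + 1)) elem,
         st.2 + PySem.Int.floordiv (l2.length : Int) ((l1.length : Int) + 1) + 1)) (l2, 0)).1
    = (PySem.List.pyRange 0 ((l2.length : Int) + (l1.length : Int)) 1).map (fun j =>
        if PySem.Int.mod j (PySem.Int.floordiv (l2.length : Int) ((l1.length : Int) + 1) + 1)
              = PySem.Int.floordiv (l2.length : Int) ((l1.length : Int) + 1) ∧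
            PySem.Int.floordiv j (PySem.Int.floordiv (l2.length : Int) ((l1.length : Int) + 1) + 1)
              < (l1.length : Int) then
          PySem.List.pyGetD l1
            (PySem.Int.floordiv j (PySem.Int.floordiv (l2.length : Int) ((l1.length : Int) + 1) + 1)) 0
        else
          PySem.List.pyGetD l2
            (j - min (PySem.Int.floordiv j (PySem.Int.floordiv (l2.length : Int) ((l1.length : Int) + 1) + 1))
               (l1.length : Int)) 0) := by
  have hgap : PySem.Int.floordiv (l2.length : Int) ((l1.length : Int) + 1)
      = ((l2.length / (l1.length + 1) : Nat) : Int) := by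
    have : ((l1.length : Int) + 1) = ((l1.length + 1 : Nat) : Int) := by push_cast; ring
    rw [this, PySem.Int.floordiv_natCast]
  set g : Nat := l2.length / (l1.length + 1) with hg
  have hbound : l1.length * g ≤ l2.length := by
    have h1 : g * (l1.length + 1) ≤ l2.length := Nat.div_mul_le_self _ _
    calc l1.length * g ≤ (l1.length + 1) * g := Nat.mul_le_mul_right g (by omega)
      _ = g * (l1.length + 1) := Nat.mul_comm _ _
      _ ≤ l2.length := h1
  -- left side: A's fold is pvChunks
  have hA := afold_eq_chunks g l1 [] l2 (by simpa using hbound)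
  simp only [List.nil_append, List.length_nil, Nat.cast_zero] at hA
  rw [hgap, hA]
  -- right side: the range-map is pvChunks too
  have hrange : PySem.List.pyRange 0 ((l2.length : Int) + (l1.length : Int)) 1
      = (List.range (l2.length + l1.length)).map (fun jn : Nat => (jn : Int)) := by
    rw [PySem.List.pyRange_one]
    have h0 : ((l2.length : Int) + (l1.length : Int) - 0).toNat = l2.length + l1.length := by
      omega
    rw [h0]
    simp
  rw [hrange, List.map_map]
  rw [← bmap_eq_chunks g l1 l2 hbound]
  apply List.map_congr_left
  intro jn _
  simp only [Function.comp]
  have hgap1 : ((g : Nat) : Int) + 1 = ((g + 1 : Nat) : Int) := by push_cast; ring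
  rw [hgap1, PySem.Int.mod_natCast, PySem.Int.floordiv_natCast]
  have hsub : (jn : Int) - min ((jn / (g + 1) : Nat) : Int) ((l1.length : Nat) : Int)
      = ((jn - min (jn / (g + 1)) l1.length : Nat) : Int) := by
    rw [← Nat.cast_min]
    have : min (jn / (g + 1)) l1.length ≤ jn :=
      le_trans (Nat.min_le_left _ _) (Nat.div_le_self _ _)
    omega
  rw [hsub]
  unfold pvPick
  simp only [Nat.cast_inj, Nat.cast_lt, PySem.List.pyGetD_natCast]

-- ===== VERDICT (by name: the statement is the Claim_ definition above) =====
theorem distribute_elements_spec : Claim_equal_distribute_elements := by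
  intro list2 list1 _
  unfold Spec_distribute_elements distribute_elements distribute_elements_alt
  by_cases h : list1.length > list2.length <;>
    simp only [h, if_true, if_false] <;> exact core _ _
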